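-- pv_equiv track=rewrite | github.com/pypi-data/pypi-mirror-402 | packages/sastadev/sastadev-0.4.1-py3-none-any.whl/sastadev/smartcompoundcomparison.py | getcommonsuffix
-- ===== SOURCE A (Python) =====
-- vowels = 'AEIOUYaeiou '
--
-- def getcommonsuffix(wrd, corr) -> str:
--     thesuffix = ''
--     lwrd = len(wrd)
--     lcorr = len(corr)
--     minl = min(lwrd, lcorr)
--     vowelfound = False
--     for i in range(minl):
--         if wrd[-i-1] == corr[-i-1]:
--             vowelfound = wrd[-i-1] in vowels
--             thesuffix =  wrd[-i-1] + thesuffix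
--         elif vowelfound:
--             return thesuffix
--         else:
--             return ''
--     return ''
-- ===== SOURCE B (Python) =====
-- vowels = 'AEIOUYaeiou '
--
-- def _mismatch(rw, rc):
--     for i, (a, b) in enumerate(zip(rw, rc)):
--         if a != b:
--             return i
--     return min(len(rw), len(rc))
--
-- def getcommonsuffix(wrd, corr) -> str:
--     rw = wrd[::-1]
--     rc = corr[::-1]
--     minl = min(len(rw), len(rc))
--     k = _mismatch(rw, rc)
--     if k == minl or k == 0 or rw[k - 1] not in vowels:
--         return ''
--     return rw[:k][::-1]
-- ===== Notes on version B (the rewrite author's own statement) =====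
-- stated objective: idiomatic
-- what changed: Replaces A's stateful backward loop (accumulator string, vowelfound flag, three-way early returns) by reversing both strings, finding the first mismatch index k of the reversed strings, and deciding the result with one post-hoc condition (k==minl, k==0, or last matched char not a vowel) plus a slice.
import Mathlib
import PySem

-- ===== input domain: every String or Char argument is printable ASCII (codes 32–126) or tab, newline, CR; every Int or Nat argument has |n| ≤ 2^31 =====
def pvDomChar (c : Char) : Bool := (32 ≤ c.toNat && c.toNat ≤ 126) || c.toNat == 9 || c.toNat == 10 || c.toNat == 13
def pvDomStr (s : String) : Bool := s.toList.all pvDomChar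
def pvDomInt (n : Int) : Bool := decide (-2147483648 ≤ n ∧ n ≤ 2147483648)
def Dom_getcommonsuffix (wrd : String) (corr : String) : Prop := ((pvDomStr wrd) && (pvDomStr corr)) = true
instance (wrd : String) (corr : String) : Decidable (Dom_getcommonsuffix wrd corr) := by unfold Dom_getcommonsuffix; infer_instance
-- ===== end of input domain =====

-- B replaces A's stateful backward loop (accumulator + vowelfound flag + early
-- returns) by a common-prefix length of the two reversed strings plus one
-- post-hoc condition and a slice; same objective behaviour, idiomatic form.

def vowelsCS : List Char := "AEIOUYaeiou ".toList

-- ===== PORT A =====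
-- the for-loop of A: state = (thesuffix, vowelfound), early returns inside
def goA (wl cl : List Char) (minl i : Nat) (suf : List Char) (vf : Bool) : List Char :=
  if i < minl then
    let wc := (PySem.List.pyGet? wl (-(i : Int) - 1)).getD ' '
    let cc := (PySem.List.pyGet? cl (-(i : Int) - 1)).getD ' '
    if wc = cc then goA wl cl minl (i + 1) (wc :: suf) (decide (wc ∈ vowelsCS))
    else if vf then suf else []
  else []
termination_by minl - i

def getcommonsuffix (wrd : String) (corr : String) : String :=
  String.ofList (goA wrd.toList corr.toList (min wrd.toList.length corr.toList.length) 0 [] false)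

-- ===== PORT B =====
-- _mismatch: index of the first differing pair of zip(rw, rc), else min length
def cpLen : List Char → List Char → Nat
  | a :: as, b :: bs => if a = b then cpLen as bs + 1 else 0
  | _, _ => 0

def getcommonsuffix_alt (wrd : String) (corr : String) : String :=
  let rw := wrd.toList.reverse
  let rc := corr.toList.reverse
  let minl := min rw.length rc.length
  let k := cpLen rw rc
  if k = minl ∨ k = 0 ∨ (PySem.List.pyGet? rw ((k : Int) - 1)).getD ' ' ∉ vowelsCS then
    String.ofList []
  else
    String.ofList (rw.take k).reverse

-- ===== PRECONDITION & SPEC =====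
def Spec_getcommonsuffix (wrd : String) (corr : String) (out : String) : Prop := out = getcommonsuffix_alt wrd corr
instance (wrd : String) (corr : String) (out : String) : Decidable (Spec_getcommonsuffix wrd corr out) := by unfold Spec_getcommonsuffix; infer_instance

-- ===== CLAIM (what is proved, stated in full; the proofs are below) =====
def Claim_equal_getcommonsuffix : Prop := ∀ (wrd : String) (corr : String), Dom_getcommonsuffix wrd corr → Spec_getcommonsuffix wrd corr (getcommonsuffix wrd corr)

-- ===== LEMMAS AND PROOFS =====

lemma cpLen_le (a b : List Char) : cpLen a b ≤ min a.length b.length := by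
  induction a generalizing b with
  | nil => simp [cpLen]
  | cons x xs ih =>
    cases b with
    | nil => simp [cpLen]
    | cons y ys =>
      simp only [cpLen]
      split
      · have := ih ys; simp [List.length_cons]; omega
      · omega

lemma cpLen_eq_at (a b : List Char) (i : Nat) (h : i < cpLen a b) : a[i]? = b[i]? := by
  induction a generalizing b i with
  | nil => simp [cpLen] at h
  | cons x xs ih =>
    cases b with
    | nil => simp [cpLen] at h
    | cons y ys =>
      simp only [cpLen] at h
      by_cases hxy : x = y
      · simp [hxy] at h
        cases i with
        | zero => simp [hxy]
        | succ j => simpa using ih ys j (by omega)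
      · simp [hxy] at h

lemma cpLen_ne_at (a b : List Char) (h : cpLen a b < min a.length b.length) :
    a[cpLen a b]? ≠ b[cpLen a b]? := by
  induction a generalizing b with
  | nil => simp at h
  | cons x xs ih =>
    cases b with
    | nil => simp at h
    | cons y ys =>
      by_cases hxy : x = y
      · simp only [cpLen, if_pos hxy] at h ⊢
        have := ih ys (by simp at h ⊢; omega)
        simpa using this
      · simp only [cpLen, if_neg hxy]
        simpa using hxy

lemma pyGet_rev (xs : List Char) (i : Nat) :
    PySem.List.pyGet? xs (-(i : Int) - 1) = xs.reverse[i]? := by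
  by_cases h : i < xs.length
  · rw [show (-(i : Int) - 1) = -(((i + 1 : Nat) : Int)) by push_cast; ring]
    rw [PySem.List.pyGet?_neg_natCast xs (i + 1) (by omega) (by omega)]
    rw [List.getElem?_reverse h]
    congr 1
    omega
  · rw [List.getElem?_eq_none (by simpa using h)]
    rw [PySem.List.pyGet?_eq_none_iff]
    simp only [PySem.Raise.InRange]
    omega

lemma goA_main (wl cl : List Char) (i : Nat)
    (hik : i ≤ cpLen wl.reverse cl.reverse) :
    goA wl cl (min wl.length cl.length) i ((wl.reverse.take i).reverse)
      (if i = 0 then false else decide ((wl.reverse[i - 1]?.getD ' ') ∈ vowelsCS)) =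
    (if cpLen wl.reverse cl.reverse = min wl.length cl.length ∨ cpLen wl.reverse cl.reverse = 0 ∨
        (PySem.List.pyGet? wl.reverse ((cpLen wl.reverse cl.reverse : Int) - 1)).getD ' ' ∉ vowelsCS then
      ([] : List Char)
    else (wl.reverse.take (cpLen wl.reverse cl.reverse)).reverse) := by
  set rw := wl.reverse with hrw
  set rc := cl.reverse with hrc
  set k := cpLen rw rc with hk
  set minl := min wl.length cl.length with hminl
  have hlen : min rw.length rc.length = minl := by simp [hrw, hrc, hminl]
  have hkle : k ≤ minl := by rw [← hlen]; exact cpLen_le rw rc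
  induction hn : minl - i using Nat.strong_induction_on generalizing i with
  | _ n ih =>
  subst hn
  by_cases hcase : i < minl
  · rw [goA, if_pos hcase]
    have hiw : i < rw.length := by simp [hrw] at hlen ⊢; omega
    have hic : i < rc.length := by simp [hrc] at hlen ⊢; omega
    simp only [pyGet_rev, ← hrw, ← hrc]
    by_cases hik' : i < k
    · have heq : rw[i]? = rc[i]? := cpLen_eq_at rw rc i hik'
      have hval : (rw[i]?.getD ' ') = (rc[i]?.getD ' ') := by rw [heq]
      rw [if_pos hval]
      have hgd : rw[i]?.getD ' ' = rw[i] := by simp [List.getElem?_eq_getElem hiw]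
      have hsuf : (rw.take (i + 1)).reverse = rw[i] :: (rw.take i).reverse := by
        rw [List.take_add_one, List.getElem?_eq_getElem hiw]; simp
      rw [hgd, ← hsuf]
      have hnext := ih (minl - (i + 1)) (by omega) (i + 1) hik' rfl
      simpa [hgd] using hnext
    · -- i = k, mismatch here (k < minl)
      have hik0 : i = k := le_antisymm hik (by omega)
      have hne : rw[i]? ≠ rc[i]? := by
        rw [hik0]; exact cpLen_ne_at rw rc (by rw [hlen]; omega)
      have hvne : (rw[i]?.getD ' ') ≠ (rc[i]?.getD ' ') := by
        rw [List.getElem?_eq_getElem hiw, List.getElem?_eq_getElem hic] at hne ⊢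
        simpa using hne
      rw [if_neg hvne, ← hik0]
      by_cases hi0 : i = 0
      · rw [if_pos hi0, if_neg (by simp)]
        rw [if_pos (Or.inr (Or.inl hi0))]
      · rw [if_neg hi0]
        have hcast : ((i : Int) - 1) = ((i - 1 : Nat) : Int) := by omega
        have hget : (PySem.List.pyGet? rw ((i : Int) - 1)).getD ' ' = rw[i - 1]?.getD ' ' := by
          rw [hcast, PySem.List.pyGet?_natCast]
        by_cases hv : (rw[i - 1]?.getD ' ') ∈ vowelsCS
        · rw [if_pos (by simpa using hv)]
          rw [if_neg (not_or.mpr ⟨by omega, not_or.mpr ⟨hi0, by rw [hget]; simpa using hv⟩⟩)]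
        · rw [if_neg (by simpa using hv)]
          rw [if_pos (Or.inr (Or.inr (by rw [hget]; exact hv)))]
  · -- i = minl, so k = minl
    have hkm : k = minl := by omega
    rw [goA, if_neg hcase]
    rw [if_pos (Or.inl hkm)]

theorem getcommonsuffix_spec : Claim_equal_getcommonsuffix := by
  intro wrd corr _
  unfold Spec_getcommonsuffix getcommonsuffix getcommonsuffix_alt
  have h := goA_main wrd.toList corr.toList 0 (Nat.zero_le _)
  simp only [List.take_zero, List.reverse_nil, if_pos, List.length_reverse] at h ⊢
  rw [h]
  split <;> rfl
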